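-- pv_equiv track=rewrite | github.com/vetrovatech/vcore | generate_product_descriptions.py | generate_seo_description
-- ===== SOURCE A (Python) =====
-- def generate_seo_description(product_name, category):
--     """
--     Generate SEO-friendly description (max 50 chars)
--     Focus on: material, use case, key feature
--     """
--     name_lower = product_name.lower()
--
--     # Extract key features from product name
--     features = []
--
--     # Glass types
--     if 'toughened' in name_lower or 'tempered' in name_lower:
--         features.append('Toughened')
--     if 'laminated' in name_lower:
--         features.append('Laminated')
--     if 'frosted' in name_lower or 'etched' in name_lower:
--         features.append('Frosted')
--     if 'clear' in name_lower:
--         features.append('Clear')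
--     if 'fluted' in name_lower:
--         features.append('Fluted')
--     if 'acid' in name_lower:
--         features.append('Acid Etched')
--     if 'sandblasted' in name_lower:
--         features.append('Sandblasted')
--
--     # Applications
--     if 'shower' in name_lower or 'bathroom' in name_lower:
--         application = 'Shower'
--     elif 'door' in name_lower:
--         application = 'Door'
--     elif 'window' in name_lower:
--         application = 'Window'
--     elif 'partition' in name_lower or 'divider' in name_lower:
--         application = 'Partition'
--     elif 'railing' in name_lower or 'balcony' in name_lower:
--         application = 'Railing'
--     elif 'table' in name_lower:
--         application = 'Table'
--     elif 'cabinet' in name_lower: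
--         application = 'Cabinet'
--     else:
--         application = category.split()[0] if category else 'Glass'
--
--     # Thickness
--     thickness = None
--     for word in product_name.split():
--         if 'mm' in word.lower():
--             thickness = word
--             break
--
--     # Build description (max 50 chars)
--     parts = []
--
--     if features:
--         parts.append(features[0])
--
--     parts.append('Glass')
--
--     if application and application not in parts:
--         parts.append(application)
--
--     if thickness:
--         parts.append(thickness)
--
--     description = ' '.join(parts)
--
--     # Ensure it's under 50 characters
--     if len(description) > 50:
--         # Try shorter version
--         if thickness:
--             description = f"{features[0] if features else ''} Glass {thickness}".strip()
--         else:
--             description = f"{features[0] if features else ''} {application} Glass".strip()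
--
--     # Final fallback
--     if len(description) > 50:
--         description = description[:47] + '...'
--
--     return description
-- ===== SOURCE B (Python) =====
-- # One-pass multi-keyword scanner: instead of A's 24 independent substring tests, walk the
-- # lowercased name once collecting the set of keywords that occur, then pick the feature
-- # and application labels from ordered tables by hit-set lookup.
-- _FEATURES = [
--     (('toughened', 'tempered'), 'Toughened'),
--     (('laminated',), 'Laminated'),
--     (('frosted', 'etched'), 'Frosted'),
--     (('clear',), 'Clear'),
--     (('fluted',), 'Fluted'),
--     (('acid',), 'Acid Etched'),
--     (('sandblasted',), 'Sandblasted'),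
-- ]
--
-- _APPLICATIONS = [
--     (('shower', 'bathroom'), 'Shower'),
--     (('door',), 'Door'),
--     (('window',), 'Window'),
--     (('partition', 'divider'), 'Partition'),
--     (('railing', 'balcony'), 'Railing'),
--     (('table',), 'Table'),
--     (('cabinet',), 'Cabinet'),
-- ]
--
-- _ALL_KEYWORDS = [k for table in (_FEATURES, _APPLICATIONS) for keys, _ in table for k in keys]
--
--
-- def _first_label(table, hits):
--     for keys, label in table:
--         if any(k in hits for k in keys):
--             return label
--     return None
--
--
-- def generate_seo_description(product_name, category):
--     nl = product_name.lower()
--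
--     # single scan over the string: collect every keyword occurring anywhere in it
--     hits = set()
--     for i in range(len(nl)):
--         suffix = nl[i:]
--         for kw in _ALL_KEYWORDS:
--             if suffix.startswith(kw):
--                 hits.add(kw)
--
--     feature = _first_label(_FEATURES, hits)
--     application = _first_label(_APPLICATIONS, hits)
--     if application is None:
--         words = category.split()
--         application = words[0] if words else 'Glass'
--
--     thickness = next((w for w in product_name.split() if 'mm' in w.lower()), None)
--
--     parts = ([feature] if feature else []) + ['Glass']
--     if application and application not in parts:
--         parts.append(application)
--     if thickness:
--         parts.append(thickness)
--     description = ' '.join(parts)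
--
--     if len(description) > 50:
--         if thickness:
--             description = f"{feature or ''} Glass {thickness}".strip()
--         else:
--             description = f"{feature or ''} {application} Glass".strip()
--
--     if len(description) > 50:
--         description = description[:47] + '...'
--
--     return description
-- ===== Notes on version B (the rewrite author's own statement) =====
-- stated objective: alternative
-- what changed: A's 24 independent 'keyword in name' substring tests are replaced by a single left-to-right scan of the lowercased name that collects the set of all occurring keywords at once, after which the feature and application labels are picked from ordered tables by hit-set lookup; assembly and 50-char trimming are unchanged.
-- crash fix: When no application keyword occurs in the product name and category is nonempty but whitespace-only, A raises IndexError on category.split()[0]; B returns the 'Glass' default via words[0] if words else 'Glass'. — e.g. on generate_seo_description("", " "): A raises IndexError, B returns "Glass"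
import Mathlib
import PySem

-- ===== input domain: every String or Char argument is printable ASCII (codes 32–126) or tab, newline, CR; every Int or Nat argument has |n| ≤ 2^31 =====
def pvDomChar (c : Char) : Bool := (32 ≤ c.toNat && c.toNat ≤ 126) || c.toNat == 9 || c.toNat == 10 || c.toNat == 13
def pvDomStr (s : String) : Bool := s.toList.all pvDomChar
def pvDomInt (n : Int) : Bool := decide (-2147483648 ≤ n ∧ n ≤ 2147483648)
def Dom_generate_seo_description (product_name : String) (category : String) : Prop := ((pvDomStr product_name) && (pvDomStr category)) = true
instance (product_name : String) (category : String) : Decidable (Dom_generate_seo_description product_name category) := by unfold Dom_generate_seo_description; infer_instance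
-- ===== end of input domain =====

-- B replaces A's 24 independent substring tests by ONE scan over the lowercased name that
-- collects the set of occurring keywords, then picks labels from ordered tables by
-- hit-set lookup; assembly/trimming kept.

-- ===== PORT A =====
-- the seven feature ifs, each appending to the features list
def pvA_features (nl : String) : List String :=
  let fs : List String := []
  let fs := if PySem.Str.isIn "toughened" nl || PySem.Str.isIn "tempered" nl then fs ++ ["Toughened"] else fs
  let fs := if PySem.Str.isIn "laminated" nl then fs ++ ["Laminated"] else fs
  let fs := if PySem.Str.isIn "frosted" nl || PySem.Str.isIn "etched" nl then fs ++ ["Frosted"] else fs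
  let fs := if PySem.Str.isIn "clear" nl then fs ++ ["Clear"] else fs
  let fs := if PySem.Str.isIn "fluted" nl then fs ++ ["Fluted"] else fs
  let fs := if PySem.Str.isIn "acid" nl then fs ++ ["Acid Etched"] else fs
  let fs := if PySem.Str.isIn "sandblasted" nl then fs ++ ["Sandblasted"] else fs
  fs

-- the application if/elif chain; category.split()[0] raises IndexError when the split is
-- empty (Pre_ excludes that), so the none case returns a dummy ""
def pvA_application (nl : String) (category : String) : String :=
  if PySem.Str.isIn "shower" nl || PySem.Str.isIn "bathroom" nl then "Shower"
  else if PySem.Str.isIn "door" nl then "Door"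
  else if PySem.Str.isIn "window" nl then "Window"
  else if PySem.Str.isIn "partition" nl || PySem.Str.isIn "divider" nl then "Partition"
  else if PySem.Str.isIn "railing" nl || PySem.Str.isIn "balcony" nl then "Railing"
  else if PySem.Str.isIn "table" nl then "Table"
  else if PySem.Str.isIn "cabinet" nl then "Cabinet"
  else if category ≠ "" then
    match (PySem.Str.split₀ category).head? with
    | some w => w
    | none => ""
  else "Glass"

-- the thickness for-loop with break
def pvA_thickness : List String → Option String
  | [] => none
  | w :: ws => if PySem.Str.isIn "mm" (PySem.Str.lower w) then some w else pvA_thickness ws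

-- parts assembly, the >50 retry and the final [:47]+'...' fallback
def pvA_finish (features : List String) (application : String) (thickness : Option String) : String :=
  let parts : List String := []
  let parts := if features ≠ [] then parts ++ [features.headD ""] else parts
  let parts := parts ++ ["Glass"]
  let parts := if application ≠ "" ∧ application ∉ parts then parts ++ [application] else parts
  let parts := match thickness with
    | some t => parts ++ [t]
    | none => parts
  let description := PySem.Str.join " " parts
  let description :=
    if 50 < PySem.Str.len description then
      match thickness with
      | some t => PySem.Str.strip (PySem.Str.join "" [features.headD "", " Glass ", t])
      | none => PySem.Str.strip (PySem.Str.join "" [features.headD "", " ", application, " Glass"])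
    else description
  if 50 < PySem.Str.len description then
    PySem.Str.join "" [PySem.Str.slice description none (some 47), "..."]
  else description

def generate_seo_description (product_name : String) (category : String) : String :=
  let nl := PySem.Str.lower product_name
  pvA_finish (pvA_features nl) (pvA_application nl category)
    (pvA_thickness (PySem.Str.split₀ product_name))

-- ===== PORT B =====
def pvFeatTable : List (List String × String) :=
  [(["toughened", "tempered"], "Toughened"), (["laminated"], "Laminated"),
   (["frosted", "etched"], "Frosted"), (["clear"], "Clear"), (["fluted"], "Fluted"),
   (["acid"], "Acid Etched"), (["sandblasted"], "Sandblasted")]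

def pvAppTable : List (List String × String) :=
  [(["shower", "bathroom"], "Shower"), (["door"], "Door"), (["window"], "Window"),
   (["partition", "divider"], "Partition"), (["railing", "balcony"], "Railing"),
   (["table"], "Table"), (["cabinet"], "Cabinet")]

-- _ALL_KEYWORDS: both tables' keyword groups, flattened in order
def pvAllKeywords : List String :=
  ["toughened", "tempered", "laminated", "frosted", "etched", "clear", "fluted", "acid",
   "sandblasted", "shower", "bathroom", "door", "window", "partition", "divider",
   "railing", "balcony", "table", "cabinet"]

-- inner loop of the scanner: add every keyword the current suffix starts with
def pvScanAt (suffix : String) (hits : PySem.Set String) : PySem.Set String :=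
  pvAllKeywords.foldl
    (fun h kw => if PySem.Str.startswith suffix kw then PySem.Set.add h kw else h) hits

-- the one-pass scan: for i in range(len(nl)): check nl[i:] against every keyword
def pvHits (nl : String) : PySem.Set String :=
  (PySem.List.pyRange 0 (PySem.Str.len nl) 1).foldl
    (fun h i => pvScanAt (PySem.Str.slice nl (some i) none) h) PySem.Set.empty

-- _first_label: first table row with a keyword in the hit set
def pvFirstLabel (hits : PySem.Set String) : List (List String × String) → Option String
  | [] => none
  | (keys, label) :: rest =>
      if keys.any (fun k => PySem.Set.contains hits k) then some label else pvFirstLabel hits rest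

-- application = first table match, else words[0] if words else 'Glass'
def pvB_application (hits : PySem.Set String) (category : String) : String :=
  match pvFirstLabel hits pvAppTable with
  | some a => a
  | none => (PySem.Str.split₀ category).headD "Glass"

-- same parts assembly and trimming as A, written from the Option-valued first feature
def pvB_finish (feature : Option String) (application : String) (thickness : Option String) : String :=
  let parts := (match feature with
    | some f => [f]
    | none => []) ++ ["Glass"]
  let parts := if application ≠ "" ∧ application ∉ parts then parts ++ [application] else parts
  let parts := match thickness with
    | some t => parts ++ [t]
    | none => parts
  let description := PySem.Str.join " " parts
  let featStr := match feature with
    | some f => f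
    | none => ""
  let description :=
    if 50 < PySem.Str.len description then
      match thickness with
      | some t => PySem.Str.strip (PySem.Str.join "" [featStr, " Glass ", t])
      | none => PySem.Str.strip (PySem.Str.join "" [featStr, " ", application, " Glass"])
    else description
  if 50 < PySem.Str.len description then
    PySem.Str.join "" [PySem.Str.slice description none (some 47), "..."]
  else description

def generate_seo_description_alt (product_name : String) (category : String) : String :=
  let nl := PySem.Str.lower product_name
  let hits := pvHits nl
  pvB_finish (pvFirstLabel hits pvFeatTable) (pvB_application hits category)
    ((PySem.Str.split₀ product_name).find? (fun w => PySem.Str.isIn "mm" (PySem.Str.lower w)))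

-- ===== PRECONDITION & SPEC =====
-- any application keyword occurring in the lowercased product name
def pvAppKeyword (nl : String) : Bool :=
  PySem.Str.isIn "shower" nl || PySem.Str.isIn "bathroom" nl || PySem.Str.isIn "door" nl ||
  PySem.Str.isIn "window" nl || PySem.Str.isIn "partition" nl || PySem.Str.isIn "divider" nl ||
  PySem.Str.isIn "railing" nl || PySem.Str.isIn "balcony" nl || PySem.Str.isIn "table" nl ||
  PySem.Str.isIn "cabinet" nl

-- Pre_ excludes only the inputs where A raises IndexError: no application keyword in the
-- name and a nonempty, whitespace-only category (category.split()[0] on an empty list).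
def Pre_generate_seo_description (product_name : String) (category : String) : Prop :=
  pvAppKeyword (PySem.Str.lower product_name) = true ∨ category = "" ∨
    PySem.Str.split₀ category ≠ []
instance (product_name : String) (category : String) : Decidable (Pre_generate_seo_description product_name category) := by unfold Pre_generate_seo_description; infer_instance

def pvWitness_generate_seo_description : String × String := ("Toughened Door 10mm", "Glass Panels")

-- When no application keyword occurs in the product name and category is nonempty but
-- whitespace-only, A raises IndexError on category.split()[0]; B returns the 'Glass'
-- default via words[0] if words else 'Glass'.
def Raises_generate_seo_description (product_name : String) (category : String) : Prop :=
  pvAppKeyword (PySem.Str.lower product_name) = false ∧ category ≠ "" ∧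
    PySem.Str.split₀ category = []
instance (product_name : String) (category : String) : Decidable (Raises_generate_seo_description product_name category) := by unfold Raises_generate_seo_description; infer_instance

def pvRaiseWitness_generate_seo_description : String × String := ("", " ")
def pvRaiseWitnessOut_generate_seo_description : String := "Glass"

def Spec_generate_seo_description (product_name : String) (category : String) (out : String) : Prop := out = generate_seo_description_alt product_name category
instance (product_name : String) (category : String) (out : String) : Decidable (Spec_generate_seo_description product_name category out) := by unfold Spec_generate_seo_description; infer_instance

-- ===== CLAIM (what is proved, stated in full; the proofs are below) =====
def Claim_equal_generate_seo_description : Prop := ∀ (product_name : String) (category : String), Dom_generate_seo_description product_name category → Pre_generate_seo_description product_name category → Spec_generate_seo_description product_name category (generate_seo_description product_name category)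

def Claim_raises_generate_seo_description : Prop := (∀ (product_name : String) (category : String), Dom_generate_seo_description product_name category → Raises_generate_seo_description product_name category → ¬ Pre_generate_seo_description product_name category) ∧ (Dom_generate_seo_description (pvRaiseWitness_generate_seo_description.1) (pvRaiseWitness_generate_seo_description.2) ∧ Raises_generate_seo_description (pvRaiseWitness_generate_seo_description.1) (pvRaiseWitness_generate_seo_description.2) ∧ generate_seo_description_alt (pvRaiseWitness_generate_seo_description.1) (pvRaiseWitness_generate_seo_description.2) = pvRaiseWitnessOut_generate_seo_description)

-- ===== LEMMAS AND PROOFS =====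

-- membership after the add-if-startswith inner fold
theorem pvMem_foldl_addif (l : List String) (h0 : PySem.Set String) (p : String → Bool)
    (x : String) :
    x ∈ l.foldl (fun h kw => if p kw then PySem.Set.add h kw else h) h0 ↔
      x ∈ h0 ∨ (x ∈ l ∧ p x = true) := by
  induction l generalizing h0 with
  | nil => simp
  | cons a l ih =>
    simp only [List.foldl_cons, ih, List.mem_cons]
    by_cases hpa : p a = true
    · simp only [hpa, if_pos, PySem.Set.mem_add]
      constructor
      · rintro (⟨h | h⟩ | h)
        · exact Or.inl h
        · exact Or.inr ⟨Or.inl h, h ▸ hpa⟩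
        · exact Or.inr ⟨Or.inr h.1, h.2⟩
      · rintro (h | ⟨h | h, hp⟩)
        · exact Or.inl (Or.inl h)
        · exact Or.inl (Or.inr h)
        · exact Or.inr ⟨h, hp⟩
    · simp only [hpa, Bool.false_eq_true]
      constructor
      · rintro (h | h)
        · exact Or.inl h
        · exact Or.inr ⟨Or.inr h.1, h.2⟩
      · rintro (h | ⟨h | h, hp⟩)
        · exact Or.inl h
        · exact absurd (h ▸ hp) hpa
        · exact Or.inr ⟨h, hp⟩

-- membership in pvScanAt
theorem pvMem_scanAt (suffix : String) (h0 : PySem.Set String) (x : String) :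
    x ∈ pvScanAt suffix h0 ↔
      x ∈ h0 ∨ (x ∈ pvAllKeywords ∧ PySem.Str.startswith suffix x = true) := by
  exact pvMem_foldl_addif pvAllKeywords h0 _ x

-- membership after the outer scan over a list of start indices
theorem pvMem_foldl_scan (nl : String) (is : List Int) (h0 : PySem.Set String) (x : String) :
    x ∈ is.foldl (fun h i => pvScanAt (PySem.Str.slice nl (some i) none) h) h0 ↔
      x ∈ h0 ∨ ∃ i ∈ is, x ∈ pvAllKeywords ∧
        PySem.Str.startswith (PySem.Str.slice nl (some i) none) x = true := by
  induction is generalizing h0 with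
  | nil => simp
  | cons a l ih =>
    simp only [List.foldl_cons, ih, pvMem_scanAt, List.mem_cons]
    constructor
    · rintro ((h | ⟨hk, hs⟩) | ⟨i, hi, h⟩)
      · exact Or.inl h
      · exact Or.inr ⟨a, Or.inl rfl, hk, hs⟩
      · exact Or.inr ⟨i, Or.inr hi, h⟩
    · rintro (h | ⟨i, hi | hi, h⟩)
      · exact Or.inl (Or.inl h)
      · subst hi; exact Or.inl (Or.inr ⟨h.1, h.2⟩)
      · exact Or.inr ⟨i, hi, h⟩

-- a nonempty keyword occurs in the hit set iff it is a substring of the name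
theorem pvHits_contains (nl kw : String) (hkw : kw ∈ pvAllKeywords) (hne : kw.toList ≠ []) :
    PySem.Set.contains (pvHits nl) kw = PySem.Str.isIn kw nl := by
  rw [Bool.eq_iff_iff]
  have hmem : PySem.Set.contains (pvHits nl) kw = true ↔ kw ∈ pvHits nl := by
    simp [PySem.Set.contains]
  rw [hmem]
  unfold pvHits
  rw [pvMem_foldl_scan]
  simp only [PySem.Set.empty, List.not_mem_nil, false_or]
  have hiff : (∃ j, kw.toList <+: List.drop j nl.toList) ↔ kw.toList <:+: nl.toList :=
    (PySem.Chars.exists_prefix_drop_iff_isIn _ _).trans (PySem.Chars.isIn_iff_infix _ _)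
  rw [PySem.Str.isIn_iff_infix, ← hiff]
  have hlen : PySem.Str.len nl = (nl.toList.length : Int) := by simp
  constructor
  · rintro ⟨i, hi, -, hs⟩
    rw [PySem.List.mem_pyRange_one] at hi
    refine ⟨i.toNat, ?_⟩
    have hs' : kw.toList <+: (PySem.Str.slice nl (some i) none).toList := by
      rw [← PySem.Chars.startswith_iff]
      simpa using hs
    simp only [pysem] at hs'
    rwa [PySem.List.slice_from nl.toList hi.1] at hs'
  · rintro ⟨j, hj⟩
    have hjlt : j < nl.toList.length := by
      by_contra hge
      simp only [not_lt] at hge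
      rw [List.drop_eq_nil_of_le hge] at hj
      exact hne (List.prefix_nil.mp hj)
    refine ⟨(j : Int), ?_, hkw, ?_⟩
    · rw [PySem.List.mem_pyRange_one, hlen]
      exact ⟨Int.natCast_nonneg j, by exact_mod_cast hjlt⟩
    · have hdrop : (PySem.Str.slice nl (some (j : Int)) none).toList = nl.toList.drop j := by
        simp [pysem]
      simp only [PySem.Str.startswith_eq, hdrop, PySem.Chars.startswith_iff]
      exact hj

-- each concrete keyword, as a rewrite rule from B's hit-set test to A's substring test
theorem pvContains_all (nl : String) :
    ∀ kw ∈ pvAllKeywords, PySem.Set.contains (pvHits nl) kw = PySem.Str.isIn kw nl := by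
  intro kw hkw
  have hne : kw.toList ≠ [] := by
    simp only [pvAllKeywords, List.mem_cons, List.not_mem_nil, or_false] at hkw
    rcases hkw with rfl|rfl|rfl|rfl|rfl|rfl|rfl|rfl|rfl|rfl|rfl|rfl|rfl|rfl|rfl|rfl|rfl|rfl|rfl <;> decide
  exact pvHits_contains nl kw hkw hne

-- A's features list has its head exactly where B's table scan finds its first label
theorem pvFeatures_head (nl : String) :
    (pvA_features nl).head? = pvFirstLabel (pvHits nl) pvFeatTable := by
  have hc := pvContains_all nl
  simp only [pvFirstLabel, pvFeatTable, List.any_cons, List.any_nil, Bool.or_false,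
    hc "toughened" (by decide), hc "tempered" (by decide), hc "laminated" (by decide),
    hc "frosted" (by decide), hc "etched" (by decide), hc "clear" (by decide),
    hc "fluted" (by decide), hc "acid" (by decide), hc "sandblasted" (by decide)]
  simp only [pvA_features]
  split_ifs <;> rfl

-- A's if/elif application chain equals B's table scan with the default, given Pre_
theorem pvApplication_eq (nl category : String)
    (h : pvAppKeyword nl = true ∨ category = "" ∨ PySem.Str.split₀ category ≠ []) :
    pvA_application nl category = pvB_application (pvHits nl) category := by
  have hc := pvContains_all nl
  simp only [pvA_application, pvB_application, pvFirstLabel, pvAppTable, List.any_cons,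
    List.any_nil, Bool.or_false,
    hc "shower" (by decide), hc "bathroom" (by decide), hc "door" (by decide),
    hc "window" (by decide), hc "partition" (by decide), hc "divider" (by decide),
    hc "railing" (by decide), hc "balcony" (by decide), hc "table" (by decide),
    hc "cabinet" (by decide)]
  split_ifs with h1 h2 h3 h4 h5 h6 h7 h8
  · rfl
  · rfl
  · rfl
  · rfl
  · rfl
  · rfl
  · rfl
  · -- default branch with category nonempty: Pre_ forces the split to be nonempty
    have hsplit : PySem.Str.split₀ category ≠ [] := by
      rcases h with h | h | h
      · exfalso; simp_all [pvAppKeyword]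
      · exact absurd h h8
      · exact h
    cases hs : PySem.Str.split₀ category with
    | nil => exact absurd hs hsplit
    | cons w ws => simp
  · simp only [ne_eq, not_not] at h8
    subst h8
    rfl

-- the thickness for-loop with break is a first-match search
theorem pvThickness_eq (ws : List String) :
    pvA_thickness ws = ws.find? (fun w => PySem.Str.isIn "mm" (PySem.Str.lower w)) := by
  induction ws with
  | nil => rfl
  | cons w ws ih =>
    simp only [pvA_thickness, List.find?]
    split_ifs with h <;> simp_all

-- both assemblies agree once the feature list is read through its head
theorem pvFinish_eq (features : List String) (application : String) (thickness : Option String) :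
    pvA_finish features application thickness = pvB_finish features.head? application thickness := by
  cases features <;> rfl

-- ===== VERDICT (by name: the statement is the Claim_ definition above) =====
theorem generate_seo_description_spec : Claim_equal_generate_seo_description := by
  intro product_name category _ hpre
  unfold Spec_generate_seo_description generate_seo_description generate_seo_description_alt
  rw [pvFinish_eq, pvFeatures_head, pvThickness_eq,
    pvApplication_eq _ _ hpre]

@[simp]
theorem generate_seo_description_raises : Claim_raises_generate_seo_description := by
  unfold Claim_raises_generate_seo_description
  refine ⟨?_, by decide⟩
  intro product_name category _ hr hpre
  rcases hr with ⟨h1, h2, h3⟩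
  rcases hpre with h | h | h <;> simp_all
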